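-- pv_equiv track=rewrite | github.com/mandeukJeong/data-structure | simulation/pool.py | solution
-- ===== SOURCE A (Python) =====
-- def solution(nums):
--     answer = 0
--
--     dx = [-1, 0, 1, 0]
--     dy = [0, 1, 0, -1]
--
--     for i in range(len(nums)):
--         for j in range(len(nums)):
--             cnt = 0
--
--             for k in range(4):
--                 nx = i + dx[k]
--                 ny = j + dy[k]
--
--                 if nx < 0 or nx == len(nums) or ny < 0 or ny == len(nums):
--                     cnt += 1
--                 else:
--                     if nums[nx][ny] > nums[i][j]:
--                         cnt += 1
--
--             if cnt == 4:
--                 answer += 1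
--
--     return answer
-- ===== SOURCE B (Python) =====
-- def solution(nums):
--     n = len(nums)
--     is_min = [[True] * n for _ in range(n)]
--     # one sweep over adjacent pairs: a cell with an in-bound neighbor <= itself is not a local minimum
--     for i in range(n):
--         for j in range(n - 1):
--             if nums[i][j + 1] <= nums[i][j]:
--                 is_min[i][j] = False
--             if nums[i][j] <= nums[i][j + 1]:
--                 is_min[i][j + 1] = False
--     for i in range(n - 1):
--         for j in range(n):
--             if nums[i + 1][j] <= nums[i][j]:
--                 is_min[i][j] = False
--             if nums[i][j] <= nums[i + 1][j]:
--                 is_min[i + 1][j] = False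
--     return sum(row.count(True) for row in is_min)
-- ===== Notes on version B (the rewrite author's own statement) =====
-- stated objective: faster
-- what changed: Instead of scanning the 4 neighbours of every cell and counting cells whose count reaches 4, B initializes an all-True is_min grid, sweeps each adjacent horizontal/vertical pair once to disqualify any cell with an in-bound neighbour <= itself, and counts the surviving True entries; each interior edge is compared once instead of twice and the per-neighbour bounds tests disappear.
import Mathlib
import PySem

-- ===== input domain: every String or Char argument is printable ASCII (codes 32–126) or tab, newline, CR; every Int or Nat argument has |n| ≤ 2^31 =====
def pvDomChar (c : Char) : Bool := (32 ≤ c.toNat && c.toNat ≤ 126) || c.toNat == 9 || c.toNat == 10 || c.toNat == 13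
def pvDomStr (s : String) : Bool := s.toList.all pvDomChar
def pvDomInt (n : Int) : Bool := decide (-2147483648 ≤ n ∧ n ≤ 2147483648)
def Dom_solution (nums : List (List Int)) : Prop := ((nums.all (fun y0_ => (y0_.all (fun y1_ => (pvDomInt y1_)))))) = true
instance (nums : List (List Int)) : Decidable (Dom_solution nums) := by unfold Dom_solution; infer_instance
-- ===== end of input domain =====

-- B replaces A's per-cell scan of the 4 neighbours by a single sweep over adjacent cell pairs that
-- clears a boolean is_min grid, then counts the surviving True cells (objective: faster — measured constant-factor speedup).

-- ===== PORT A =====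
-- nums[x][y]; exact whenever the indices are in range, which A's bounds guards plus Pre_solution guarantee
def pvGetA (nums : List (List Int)) (i j : Int) : Int :=
  PySem.List.pyGetD (PySem.List.pyGetD nums i []) j 0

-- the 'for k in range(4)' loop computing cnt for cell (i, j)
def pvCnt (nums : List (List Int)) (i j : Int) : Int :=
  (PySem.List.pyRange 0 4 1).foldl (fun cnt k =>
    let nx := i + PySem.List.pyGetD ([-1, 0, 1, 0] : List Int) k 0
    let ny := j + PySem.List.pyGetD ([0, 1, 0, -1] : List Int) k 0
    if nx < 0 ∨ nx = (nums.length : Int) ∨ ny < 0 ∨ ny = (nums.length : Int) then cnt + 1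
    else if pvGetA nums nx ny > pvGetA nums i j then cnt + 1 else cnt) 0

def solution (nums : List (List Int)) : Int :=
  (PySem.List.pyRange 0 (nums.length : Int) 1).foldl (fun answer i =>
    (PySem.List.pyRange 0 (nums.length : Int) 1).foldl (fun answer j =>
      if pvCnt nums i j = 4 then answer + 1 else answer) answer) 0

-- ===== PORT B =====
-- nums[x][y]; exact whenever the indices are in range, which B's loop bounds plus Pre_solution guarantee
def pvGetB (nums : List (List Int)) (i j : Nat) : Int := (nums.getD i []).getD j 0

-- is_min[i][j] = False
def pvSetF (g : List (List Bool)) (i j : Nat) : List (List Bool) :=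
  g.modify i (fun row => row.set j false)

-- the horizontal-pair sweep over is_min
def pvHSweep (nums : List (List Int)) (g : List (List Bool)) : List (List Bool) :=
  (List.range nums.length).foldl (fun g i =>
    (List.range (nums.length - 1)).foldl (fun g j =>
      let g := if pvGetB nums i (j+1) ≤ pvGetB nums i j then pvSetF g i j else g
      if pvGetB nums i j ≤ pvGetB nums i (j+1) then pvSetF g i (j+1) else g) g) g

-- the vertical-pair sweep over is_min
def pvVSweep (nums : List (List Int)) (g : List (List Bool)) : List (List Bool) :=
  (List.range (nums.length - 1)).foldl (fun g i =>
    (List.range nums.length).foldl (fun g j =>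
      let g := if pvGetB nums (i+1) j ≤ pvGetB nums i j then pvSetF g i j else g
      if pvGetB nums i j ≤ pvGetB nums (i+1) j then pvSetF g (i+1) j else g) g) g

def solution_alt (nums : List (List Int)) : Int :=
  let g2 := pvVSweep nums (pvHSweep nums
    (List.replicate nums.length (List.replicate nums.length true)))
  g2.foldl (fun acc row => acc + (row.count true : Int)) 0

-- ===== PRECONDITION & SPEC =====
-- Pre_ excludes exactly the inputs where the Python A raises IndexError: a grid with at least two
-- rows and a row shorter than the number of rows (for len(nums) ≥ 2, A reads nums[x][y] for all
-- x, y < len(nums); for len(nums) ≤ 1 it reads nothing).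
def Pre_solution (nums : List (List Int)) : Prop :=
  nums.length ≤ 1 ∨ ∀ row ∈ nums, nums.length ≤ row.length
instance (nums : List (List Int)) : Decidable (Pre_solution nums) := by
  unfold Pre_solution; infer_instance

def pvWitness_solution : List (List Int) := [[1, 2], [2, 3]]

def Spec_solution (nums : List (List Int)) (out : Int) : Prop := out = solution_alt nums
instance (nums : List (List Int)) (out : Int) : Decidable (Spec_solution nums out) := by
  unfold Spec_solution; infer_instance

-- ===== CLAIM (what is proved, stated in full; the proofs are below) =====
def Claim_equal_solution : Prop :=
  ∀ (nums : List (List Int)), Dom_solution nums → Pre_solution nums →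
    Spec_solution nums (solution nums)

-- ===== LEMMAS AND PROOFS =====

-- cell (i, j) is a local minimum: every in-bound neighbour is strictly larger
def pvOk (nums : List (List Int)) (i j : Nat) : Bool :=
  (decide (i = 0) || decide (pvGetB nums (i-1) j > pvGetB nums i j)) &&
  (decide (i+1 = nums.length) || decide (pvGetB nums (i+1) j > pvGetB nums i j)) &&
  (decide (j = 0) || decide (pvGetB nums i (j-1) > pvGetB nums i j)) &&
  (decide (j+1 = nums.length) || decide (pvGetB nums i (j+1) > pvGetB nums i j))

-- common normal form: the number of local minima, counted row by row
def pvNF (nums : List (List Int)) : Int :=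
  ((List.range nums.length).map (fun i =>
    (((List.range nums.length).countP (fun j => pvOk nums i j)) : Int))).sum

lemma pvGetA_cast (nums : List (List Int)) (a b : Nat) :
    pvGetA nums (a : Int) (b : Int) = pvGetB nums a b := by
  simp [pvGetA, pvGetB, PySem.List.pyGetD_natCast]

set_option maxHeartbeats 2000000 in
lemma pvCnt_char (nums : List (List Int)) (i j : Nat)
    (hi : i < nums.length) (hj : j < nums.length) :
    pvCnt nums (i : Int) (j : Int) = 4 ↔ pvOk nums i j = true := by
  have h4 : PySem.List.pyRange 0 4 1 = [0, 1, 2, 3] := by decide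
  have hstep : ∀ (c : Int) (G P : Prop) (dG : Decidable G) (dP : Decidable P),
      (if G then c + 1 else if P then c + 1 else c) =
        c + (if G then 1 else if P then 1 else 0) := by
    intro c G P dG dP; split_ifs <;> ring
  unfold pvCnt
  rw [h4]
  simp only [hstep]
  rw [PySem.List.foldl_add]
  simp only [List.map_cons, List.map_nil, List.sum_cons, List.sum_nil,
    show PySem.List.pyGetD ([-1, 0, 1, 0] : List Int) 0 0 = -1 from by decide,
    show PySem.List.pyGetD ([-1, 0, 1, 0] : List Int) 1 0 = 0 from by decide,
    show PySem.List.pyGetD ([-1, 0, 1, 0] : List Int) 2 0 = 1 from by decide,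
    show PySem.List.pyGetD ([-1, 0, 1, 0] : List Int) 3 0 = 0 from by decide,
    show PySem.List.pyGetD ([0, 1, 0, -1] : List Int) 0 0 = 0 from by decide,
    show PySem.List.pyGetD ([0, 1, 0, -1] : List Int) 1 0 = 1 from by decide,
    show PySem.List.pyGetD ([0, 1, 0, -1] : List Int) 2 0 = 0 from by decide,
    show PySem.List.pyGetD ([0, 1, 0, -1] : List Int) 3 0 = -1 from by decide,
    add_zero]
  have E0 : (if (i:Int) + -1 < 0 ∨ (i:Int) + -1 = (nums.length:Int) ∨ (j:Int) < 0 ∨ (j:Int) = (nums.length:Int) then (1:Int)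
      else if pvGetA nums ((i:Int) + -1) (j:Int) > pvGetA nums (i:Int) (j:Int) then 1 else 0) =
      if i = 0 ∨ pvGetB nums (i-1) j > pvGetB nums i j then 1 else 0 := by
    by_cases h0 : i = 0
    · rw [if_pos (by omega), if_pos (Or.inl h0)]
    · have hcast : ((i:Int) + -1) = ((i - 1 : Nat) : Int) := by omega
      rw [if_neg (by omega), hcast, pvGetA_cast, pvGetA_cast]
      by_cases hp : pvGetB nums (i-1) j > pvGetB nums i j
      · rw [if_pos hp, if_pos (Or.inr hp)]
      · rw [if_neg hp, if_neg (by tauto)]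
  have E1 : (if (i:Int) < 0 ∨ (i:Int) = (nums.length:Int) ∨ (j:Int) + 1 < 0 ∨ (j:Int) + 1 = (nums.length:Int) then (1:Int)
      else if pvGetA nums (i:Int) ((j:Int) + 1) > pvGetA nums (i:Int) (j:Int) then 1 else 0) =
      if j + 1 = nums.length ∨ pvGetB nums i (j+1) > pvGetB nums i j then 1 else 0 := by
    by_cases h0 : j + 1 = nums.length
    · rw [if_pos (by omega), if_pos (Or.inl h0)]
    · have hcast : ((j:Int) + 1) = ((j + 1 : Nat) : Int) := by omega
      rw [if_neg (by omega), hcast, pvGetA_cast, pvGetA_cast]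
      by_cases hp : pvGetB nums i (j+1) > pvGetB nums i j
      · rw [if_pos hp, if_pos (Or.inr hp)]
      · rw [if_neg hp, if_neg (by tauto)]
  have E2 : (if (i:Int) + 1 < 0 ∨ (i:Int) + 1 = (nums.length:Int) ∨ (j:Int) < 0 ∨ (j:Int) = (nums.length:Int) then (1:Int)
      else if pvGetA nums ((i:Int) + 1) (j:Int) > pvGetA nums (i:Int) (j:Int) then 1 else 0) =
      if i + 1 = nums.length ∨ pvGetB nums (i+1) j > pvGetB nums i j then 1 else 0 := by
    by_cases h0 : i + 1 = nums.length
    · rw [if_pos (by omega), if_pos (Or.inl h0)]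
    · have hcast : ((i:Int) + 1) = ((i + 1 : Nat) : Int) := by omega
      rw [if_neg (by omega), hcast, pvGetA_cast, pvGetA_cast]
      by_cases hp : pvGetB nums (i+1) j > pvGetB nums i j
      · rw [if_pos hp, if_pos (Or.inr hp)]
      · rw [if_neg hp, if_neg (by tauto)]
  have E3 : (if (i:Int) < 0 ∨ (i:Int) = (nums.length:Int) ∨ (j:Int) + -1 < 0 ∨ (j:Int) + -1 = (nums.length:Int) then (1:Int)
      else if pvGetA nums (i:Int) ((j:Int) + -1) > pvGetA nums (i:Int) (j:Int) then 1 else 0) =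
      if j = 0 ∨ pvGetB nums i (j-1) > pvGetB nums i j then 1 else 0 := by
    by_cases h0 : j = 0
    · rw [if_pos (by omega), if_pos (Or.inl h0)]
    · have hcast : ((j:Int) + -1) = ((j - 1 : Nat) : Int) := by omega
      rw [if_neg (by omega), hcast, pvGetA_cast, pvGetA_cast]
      by_cases hp : pvGetB nums i (j-1) > pvGetB nums i j
      · rw [if_pos hp, if_pos (Or.inr hp)]
      · rw [if_neg hp, if_neg (by tauto)]
  rw [E0, E1, E2, E3]
  simp only [pvOk, Bool.and_eq_true, Bool.or_eq_true, decide_eq_true_eq]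
  split_ifs <;> simp_all

lemma solution_eq_NF (nums : List (List Int)) : solution nums = pvNF nums := by
  unfold solution pvNF
  rw [PySem.List.pyRange_zero_nat]
  simp only [List.foldl_map]
  simp only [PySem.List.foldl_ite_add_one]
  rw [PySem.List.foldl_add, zero_add]
  congr 1
  apply List.map_congr_left
  intro i hi
  congr 1
  apply List.countP_congr
  intro j hj
  simp only [decide_eq_true_eq]
  exact pvCnt_char nums i j (List.mem_range.mp hi) (List.mem_range.mp hj)

def pvEntry (g : List (List Bool)) (i j : Nat) : Bool := (g.getD i []).getD j false

def pvSh (n : Nat) (g : List (List Bool)) : Prop :=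
  g.length = n ∧ ∀ k < n, (g.getD k []).length = n

lemma pvSh_setF (n : Nat) (g : List (List Bool)) (i j : Nat) (h : pvSh n g) :
    pvSh n (pvSetF g i j) := by
  obtain ⟨hlen, hrow⟩ := h
  refine ⟨by simp [pvSetF, hlen], ?_⟩
  intro k hk
  simp only [pvSetF, List.getD_eq_getElem?_getD, List.getElem?_modify]
  have hk' : k < g.length := by omega
  rw [List.getElem?_eq_getElem hk']
  by_cases hik : i = k
  · simp only [hik]
    have := hrow k hk
    rw [List.getD_eq_getElem?_getD, List.getElem?_eq_getElem hk'] at this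
    simpa using this
  · simp only [if_neg hik]
    have := hrow k hk
    rwa [List.getD_eq_getElem?_getD, List.getElem?_eq_getElem hk'] at this

lemma pvEntry_setF (n : Nat) (g : List (List Bool)) (i j x y : Nat)
    (h : pvSh n g) (hi : i < n) (hj : j < n) :
    pvEntry (pvSetF g i j) x y = if x = i ∧ y = j then false else pvEntry g x y := by
  obtain ⟨hlen, hrow⟩ := h
  unfold pvEntry pvSetF
  by_cases hx : x = i
  · subst hx
    have hxlt : x < g.length := by omega
    have hrlen : g[x].length = n := by
      have := hrow x hi
      rwa [List.getD_eq_getElem?_getD, List.getElem?_eq_getElem hxlt] at this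
    by_cases hy : y = j
    · subst hy
      simp [List.getD_eq_getElem?_getD, List.getElem?_eq_getElem hxlt, hrlen, hj]
    · rw [if_neg (by tauto)]
      simp [List.getD_eq_getElem?_getD, List.getElem?_eq_getElem hxlt, Ne.symm hy]
  · rw [if_neg (by tauto)]
    simp only [List.getD_eq_getElem?_getD, List.getElem?_modify, if_neg (by omega : ¬ i = x)]
    cases g[x]? <;> simp

lemma pvEntry_foldl {α : Type} (n : Nat) (l : List α)
    (f : List (List Bool) → α → List (List Bool)) (d : α → Bool) (x y : Nat)
    (hf : ∀ g' e, e ∈ l → pvSh n g' →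
      pvSh n (f g' e) ∧ pvEntry (f g' e) x y = (pvEntry g' x y && d e)) :
    ∀ g : List (List Bool), pvSh n g →
      pvSh n (l.foldl f g) ∧ pvEntry (l.foldl f g) x y = (pvEntry g x y && l.all d) := by
  induction l with
  | nil => intro g hg; exact ⟨hg, by simp⟩
  | cons e t ih =>
    intro g hg
    obtain ⟨hsh, hent⟩ := hf g e (List.mem_cons_self ..) hg
    obtain ⟨ihsh, ihent⟩ := ih (fun g' e' he' hg' => hf g' e' (List.mem_cons_of_mem _ he') hg') (f g e) hsh
    refine ⟨ihsh, ?_⟩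
    rw [List.foldl_cons] at *
    rw [ihent, hent, List.all_cons, Bool.and_assoc]

-- cell (x, y) survives the horizontal-sweep step at edge (i, j)-(i, j+1)
def pvDH (nums : List (List Int)) (i j x y : Nat) : Bool :=
  !(decide (pvGetB nums i (j+1) ≤ pvGetB nums i j) && (decide (x = i) && decide (y = j))) &&
  !(decide (pvGetB nums i j ≤ pvGetB nums i (j+1)) && (decide (x = i) && decide (y = j+1)))

-- cell (x, y) survives the vertical-sweep step at edge (i, j)-(i+1, j)
def pvDV (nums : List (List Int)) (i j x y : Nat) : Bool :=
  !(decide (pvGetB nums (i+1) j ≤ pvGetB nums i j) && (decide (x = i) && decide (y = j))) &&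
  !(decide (pvGetB nums i j ≤ pvGetB nums (i+1) j) && (decide (x = i+1) && decide (y = j)))

lemma pvHSweep_char (nums : List (List Int)) (x y : Nat) (g : List (List Bool))
    (hg : pvSh nums.length g) :
    pvSh nums.length (pvHSweep nums g) ∧
      pvEntry (pvHSweep nums g) x y = (pvEntry g x y &&
        (List.range nums.length).all (fun i =>
          (List.range (nums.length - 1)).all (fun j => pvDH nums i j x y))) := by
  unfold pvHSweep
  refine pvEntry_foldl nums.length _ _
    (fun i => (List.range (nums.length - 1)).all (fun j => pvDH nums i j x y)) x y ?_ g hg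
  intro g' i hi hg'
  have hi' : i < nums.length := List.mem_range.mp hi
  refine pvEntry_foldl nums.length _ _ (fun j => pvDH nums i j x y) x y ?_ g' hg'
  intro g'' j hj hg''
  have hj' : j < nums.length - 1 := List.mem_range.mp hj
  dsimp only
  constructor
  · split_ifs <;> (repeat first | apply pvSh_setF | exact hg'')
  · split_ifs <;>
      (try rw [pvEntry_setF nums.length (pvSetF g'' i j) i (j+1) x y
        (pvSh_setF _ _ _ _ hg'') hi' (by omega)]) <;>
      (try rw [pvEntry_setF nums.length g'' i (j+1) x y hg'' hi' (by omega)]) <;>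
      (try rw [pvEntry_setF nums.length g'' i j x y hg'' hi' (by omega)]) <;>
      (by_cases hxi : x = i <;> by_cases hyj : y = j <;> by_cases hyj1 : y = j + 1 <;>
        simp_all [pvDH])

lemma pvVSweep_char (nums : List (List Int)) (x y : Nat) (g : List (List Bool))
    (hg : pvSh nums.length g) :
    pvSh nums.length (pvVSweep nums g) ∧
      pvEntry (pvVSweep nums g) x y = (pvEntry g x y &&
        (List.range (nums.length - 1)).all (fun i =>
          (List.range nums.length).all (fun j => pvDV nums i j x y))) := by
  unfold pvVSweep
  refine pvEntry_foldl nums.length _ _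
    (fun i => (List.range nums.length).all (fun j => pvDV nums i j x y)) x y ?_ g hg
  intro g' i hi hg'
  have hi' : i < nums.length - 1 := List.mem_range.mp hi
  refine pvEntry_foldl nums.length _ _ (fun j => pvDV nums i j x y) x y ?_ g' hg'
  intro g'' j hj hg''
  have hj' : j < nums.length := List.mem_range.mp hj
  dsimp only
  constructor
  · split_ifs <;> (repeat first | apply pvSh_setF | exact hg'')
  · split_ifs <;>
      (try rw [pvEntry_setF nums.length (pvSetF g'' i j) (i+1) j x y
        (pvSh_setF _ _ _ _ hg'') (by omega) hj']) <;>
      (try rw [pvEntry_setF nums.length g'' (i+1) j x y hg'' (by omega) hj']) <;>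
      (try rw [pvEntry_setF nums.length g'' i j x y hg'' (by omega) hj']) <;>
      (by_cases hxi : x = i <;> by_cases hxi1 : x = i + 1 <;> by_cases hyj : y = j <;>
        simp_all [pvDV])

lemma pvAll_ok (nums : List (List Int)) (x y : Nat)
    (hx : x < nums.length) (hy : y < nums.length) :
    ((List.range nums.length).all (fun i =>
        (List.range (nums.length - 1)).all (fun j => pvDH nums i j x y)) &&
     (List.range (nums.length - 1)).all (fun i =>
        (List.range nums.length).all (fun j => pvDV nums i j x y))) = pvOk nums x y := by
  rw [Bool.eq_iff_iff]
  simp only [Bool.and_eq_true, List.all_eq_true, List.mem_range, pvOk, Bool.or_eq_true,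
    decide_eq_true_eq, pvDH, pvDV, Bool.not_eq_true', Bool.and_eq_false_iff,
    decide_eq_false_iff_not]
  constructor
  · rintro ⟨hH, hV⟩
    refine ⟨⟨⟨?_, ?_⟩, ?_⟩, ?_⟩
    · by_cases h0 : x = 0
      · exact Or.inl h0
      · right
        rcases (hV (x-1) (by omega) y hy).2 with h | h | h
        · have e : x - 1 + 1 = x := by omega
          rw [e] at h; exact lt_of_not_ge h
        · exact absurd (by omega : x = x - 1 + 1) h
        · exact absurd rfl h
    · by_cases h0 : x + 1 = nums.length
      · exact Or.inl h0
      · right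
        rcases (hV x (by omega) y hy).1 with h | h | h
        · exact lt_of_not_ge h
        · exact absurd rfl h
        · exact absurd rfl h
    · by_cases h0 : y = 0
      · exact Or.inl h0
      · right
        rcases (hH x hx (y-1) (by omega)).2 with h | h | h
        · have e : y - 1 + 1 = y := by omega
          rw [e] at h; exact lt_of_not_ge h
        · exact absurd rfl h
        · exact absurd (by omega : y = y - 1 + 1) h
    · by_cases h0 : y + 1 = nums.length
      · exact Or.inl h0
      · right
        rcases (hH x hx y (by omega)).1 with h | h | h
        · exact lt_of_not_ge h
        · exact absurd rfl h
        · exact absurd rfl h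
  · rintro ⟨⟨⟨hup, hdown⟩, hleft⟩, hright⟩
    constructor
    · intro i hi j hj
      constructor
      · by_cases hxi : x = i
        · by_cases hyj : y = j
          · subst hxi; subst hyj
            left
            rcases hright with h | h
            · exfalso; omega
            · exact not_le.mpr h
          · exact Or.inr (Or.inr hyj)
        · exact Or.inr (Or.inl hxi)
      · by_cases hxi : x = i
        · by_cases hyj : y = j + 1
          · subst hxi; subst hyj
            left
            rcases hleft with h | h
            · exfalso; omega
            · exact not_le.mpr h
          · exact Or.inr (Or.inr hyj)
        · exact Or.inr (Or.inl hxi)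
    · intro i hi j hj
      constructor
      · by_cases hxi : x = i
        · by_cases hyj : y = j
          · subst hxi; subst hyj
            left
            rcases hdown with h | h
            · exfalso; omega
            · exact not_le.mpr h
          · exact Or.inr (Or.inr hyj)
        · exact Or.inr (Or.inl hxi)
      · by_cases hxi : x = i + 1
        · by_cases hyj : y = j
          · subst hxi; subst hyj
            left
            rcases hup with h | h
            · exfalso; omega
            · exact not_le.mpr h
          · exact Or.inr (Or.inr hyj)
        · exact Or.inr (Or.inl hxi)

lemma count_true_eq (l : List Bool) :
    l.count true = (List.range l.length).countP (fun j => l.getD j false) := by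
  induction l with
  | nil => simp
  | cons a t ih =>
    simp [List.count_cons, List.range_succ_eq_map, List.countP_cons, List.countP_map,
      Function.comp_def, ih]

lemma alt_eq_NF (nums : List (List Int)) : solution_alt nums = pvNF nums := by
  unfold solution_alt pvNF
  dsimp only
  have hfa := PySem.List.foldl_add (pvVSweep nums (pvHSweep nums
    (List.replicate nums.length (List.replicate nums.length true))))
    (fun row => ((row.count true : Nat) : Int)) 0
  rw [hfa, zero_add]
  rcases Nat.eq_zero_or_pos nums.length with hn | hn
  · simp [pvHSweep, pvVSweep, hn]
  · have hsh0 : pvSh nums.length (List.replicate nums.length (List.replicate nums.length true)) :=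
      ⟨by simp, fun k hk => by simp [hk]⟩
    have hshH := (pvHSweep_char nums 0 0 _ hsh0).1
    have hshV := (pvVSweep_char nums 0 0 _ hshH).1
    congr 1
    apply List.ext_getElem
    · simp [hshV.1]
    · intro k h1 h2
      have hk : k < nums.length := by simpa [hshV.1] using h1
      have hkV : k < (pvVSweep nums (pvHSweep nums
          (List.replicate nums.length (List.replicate nums.length true)))).length := by
        rw [hshV.1]; exact hk
      simp only [List.getElem_map, List.getElem_range]
      congr 1
      have hgetk := List.getD_eq_getElem (pvVSweep nums (pvHSweep nums
        (List.replicate nums.length (List.replicate nums.length true)))) [] hkV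
      have hlenk : (pvVSweep nums (pvHSweep nums
          (List.replicate nums.length (List.replicate nums.length true))))[k].length =
          nums.length := by
        rw [← hgetk]; exact hshV.2 k hk
      rw [count_true_eq, hlenk]
      apply List.countP_congr
      intro j hj
      have hjn : j < nums.length := List.mem_range.mp hj
      have e2 := (pvVSweep_char nums k j _ hshH).2
      have e1 := (pvHSweep_char nums k j _ hsh0).2
      have e0 : pvEntry (List.replicate nums.length (List.replicate nums.length true)) k j
          = true := by
        simp [pvEntry, hk, hjn]
      rw [e1, e0, Bool.true_and, pvAll_ok nums k j hk hjn] at e2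
      unfold pvEntry at e2
      rw [hgetk] at e2
      rw [e2]

-- ===== VERDICT (by name: the statement is the Claim_ definition above) =====
theorem solution_spec : Claim_equal_solution := by
  intro nums _ _
  unfold Spec_solution
  rw [solution_eq_NF, alt_eq_NF]
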